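-- pv_equiv track=rewrite | github.com/AstrodynamicDisaster/valeria | core/payslip_parser.py | find_between
-- ===== SOURCE A (Python) =====
-- from typing import List, Dict, Tuple, Optional
--
-- def find_between(lines: List[str], start: str, end: str) -> List[str]:
--     try:
--         i = next(i for i, line in enumerate(lines) if start.lower() in line.lower())
--     except StopIteration:
--         return []
--     try:
--         j = next(j for j in range(i + 1, len(lines)) if end.lower() in lines[j].lower())
--     except StopIteration:
--         j = len(lines)
--     return lines[i + 1 : j]
-- ===== SOURCE B (Python) =====
-- from typing import List
--
-- def find_between(lines: List[str], start: str, end: str) -> List[str]: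
--     s, e = start.lower(), end.lower()
--     collecting = False
--     out: List[str] = []
--     for line in lines:
--         low = line.lower()
--         if collecting:
--             if e in low:
--                 return out
--             out.append(line)
--         elif s in low:
--             collecting = True
--     return out
-- ===== Notes on version B (the rewrite author's own statement) =====
-- stated objective: alternative
-- what changed: A searches for the start index via enumerate, then searches a second index over range(i+1, len) with repeated indexing, then slices; B is a single structural pass over the lines with a collecting flag and an accumulator, returning the accumulated lines as soon as the end marker is seen.
import Mathlib
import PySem

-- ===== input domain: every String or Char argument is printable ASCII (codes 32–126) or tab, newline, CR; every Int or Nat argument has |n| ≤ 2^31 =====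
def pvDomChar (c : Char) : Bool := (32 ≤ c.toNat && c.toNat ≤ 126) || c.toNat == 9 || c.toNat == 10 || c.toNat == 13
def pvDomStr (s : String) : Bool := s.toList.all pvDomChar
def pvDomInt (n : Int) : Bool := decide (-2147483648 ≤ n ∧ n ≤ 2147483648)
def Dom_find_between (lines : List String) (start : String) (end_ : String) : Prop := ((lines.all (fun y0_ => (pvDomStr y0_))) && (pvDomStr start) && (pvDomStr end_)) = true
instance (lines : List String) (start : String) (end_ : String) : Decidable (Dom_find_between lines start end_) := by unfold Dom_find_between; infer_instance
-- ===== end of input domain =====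

-- B replaces A's index search + second index search + slice by one structural pass with a
-- collecting flag and an accumulator (alternative decomposition, same asymptotic cost).

-- ===== PORT A =====
-- literal port of A: first matching index i (via enumerate), first matching j in range(i+1, len), slice.
def find_between (lines : List String) (start : String) (end_ : String) : List String :=
  match (PySem.List.enumerate lines 0).find?
      (fun p => PySem.Str.isIn (PySem.Str.lower start) (PySem.Str.lower p.2)) with
  | none => []
  | some p =>
    let j : Int :=
      match (PySem.List.pyRange (p.1 + 1) (lines.length : Int) 1).find?
          (fun j => PySem.Str.isIn (PySem.Str.lower end_)
                      (PySem.Str.lower (PySem.List.pyGetD lines j ""))) with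
      | none => (lines.length : Int)
      | some j => j
    PySem.List.slice lines (some (p.1 + 1)) (some j)

-- ===== PORT B =====
def fbCollect (e : String) (acc : List String) : List String → List String
  | [] => acc
  | l :: rest =>
      if PySem.Str.isIn e (PySem.Str.lower l) then acc
      else fbCollect e (acc ++ [l]) rest

def fbSeek (s e : String) : List String → List String
  | [] => []
  | l :: rest =>
      if PySem.Str.isIn s (PySem.Str.lower l) then fbCollect e [] rest
      else fbSeek s e rest

def find_between_alt (lines : List String) (start : String) (end_ : String) : List String :=
  fbSeek (PySem.Str.lower start) (PySem.Str.lower end_) lines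

-- ===== PRECONDITION & SPEC =====
def Spec_find_between (lines : List String) (start : String) (end_ : String) (out : List String) : Prop := out = find_between_alt lines start end_
instance (lines : List String) (start : String) (end_ : String) (out : List String) : Decidable (Spec_find_between lines start end_ out) := by unfold Spec_find_between; infer_instance

-- ===== CLAIM (what is proved, stated in full; the proofs are below) =====
def Claim_equal_find_between : Prop := ∀ (lines : List String) (start : String) (end_ : String), Dom_find_between lines start end_ → Spec_find_between lines start end_ (find_between lines start end_)

-- ===== LEMMAS AND PROOFS =====

lemma fbCollect_eq (e : String) (acc xs : List String) :
    fbCollect e acc xs = acc ++ xs.takeWhile (fun l => !PySem.Str.isIn e (PySem.Str.lower l)) := by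
  induction xs generalizing acc with
  | nil => simp [fbCollect]
  | cons l rest ih =>
    by_cases h : PySem.Chars.isIn e.toList (PySem.Chars.lower l.toList) = true <;>
      simp [fbCollect, h, ih]

-- the inner j-search plus slice of A equals takeWhile on the suffix
lemma tail_eq (lines : List String) (q : String → Bool) :
    ∀ fuel k : Nat, lines.length = k + fuel →
    PySem.List.slice lines (some (k : Int))
      (some (match (PySem.List.pyRange (k : Int) (lines.length : Int) 1).find?
                (fun j => q (PySem.List.pyGetD lines j "")) with
             | none => (lines.length : Int)
             | some j => j)) =
    (lines.drop k).takeWhile (fun l => !q l) := by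
  intro fuel
  induction fuel with
  | zero =>
    intro k hk
    rw [PySem.List.pyRange_one_eq_nil (by omega)]
    simp only [List.find?_nil]
    rw [PySem.List.slice_natCast]
    simp [List.drop_eq_nil_of_le (by omega : lines.length ≤ k)]
  | succ n ih =>
    intro k hk
    have hklt : k < lines.length := by omega
    rw [PySem.List.pyRange_one_cons (by exact_mod_cast hklt)]
    rw [List.find?_cons]
    have hget : PySem.List.pyGetD lines (k : Int) "" = lines[k] := by
      rw [PySem.List.pyGetD_natCast]
      simp [List.getD, hklt]
    have hdrop : lines.drop k = lines[k] :: lines.drop (k + 1) :=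
      List.drop_eq_getElem_cons hklt
    by_cases hq : q (PySem.List.pyGetD lines (k : Int) "") = true
    · simp only [hq]
      rw [PySem.List.slice_natCast]
      rw [hdrop, List.takeWhile_cons]
      rw [hget] at hq
      simp [hq]
    · simp only [Bool.not_eq_true] at hq
      simp only [hq]
      have hcast : ((k : Int) + 1) = ((k + 1 : Nat) : Int) := by push_cast; ring
      rw [hcast]
      have ih' := ih (k + 1) (by omega)
      -- the j produced by the recursive search is ≥ k+1
      set j : Int := (match (PySem.List.pyRange ((k + 1 : Nat) : Int) (lines.length : Int) 1).find?
                (fun j => q (PySem.List.pyGetD lines j "")) with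
             | none => (lines.length : Int)
             | some j => j) with hj
      have hjge : ((k + 1 : Nat) : Int) ≤ j ∧ j ≤ (lines.length : Int) := by
        rw [hj]
        cases hfind : (PySem.List.pyRange ((k + 1 : Nat) : Int) (lines.length : Int) 1).find?
            (fun j => q (PySem.List.pyGetD lines j "")) with
        | none =>
          constructor
          · show ((k + 1 : Nat) : Int) ≤ (lines.length : Int)
            exact_mod_cast (by omega : k + 1 ≤ lines.length)
          · show (lines.length : Int) ≤ (lines.length : Int)
            exact le_refl _
        | some j' =>
          have hmem := List.mem_of_find?_eq_some hfind
          rw [PySem.List.mem_pyRange_one] at hmem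
          simpa using ⟨hmem.1, le_of_lt hmem.2⟩
      rw [PySem.List.slice_toNat _ (by positivity) (by omega)]
      rw [PySem.List.slice_toNat _ (by positivity) (by omega)] at ih'
      simp only [Int.toNat_natCast] at ih' ⊢
      rw [hget] at hq
      rw [hdrop, List.takeWhile_cons, hq]
      simp only [Bool.not_false, if_pos]
      have h1 : j.toNat - k = (j.toNat - (k + 1)) + 1 := by omega
      rw [h1, List.take_succ_cons, ih']

-- the whole of A on a suffix equals fbSeek on that suffix
lemma seek_eq (lines : List String) (start end_ : String) :
    ∀ fuel k : Nat, lines.length = k + fuel →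
    (match (PySem.List.enumerate (lines.drop k) (k : Int)).find?
        (fun p => PySem.Str.isIn (PySem.Str.lower start) (PySem.Str.lower p.2)) with
     | none => []
     | some p =>
       let j : Int :=
         match (PySem.List.pyRange (p.1 + 1) (lines.length : Int) 1).find?
             (fun j => PySem.Str.isIn (PySem.Str.lower end_)
                         (PySem.Str.lower (PySem.List.pyGetD lines j ""))) with
         | none => (lines.length : Int)
         | some j => j
       PySem.List.slice lines (some (p.1 + 1)) (some j)) =
    fbSeek (PySem.Str.lower start) (PySem.Str.lower end_) (lines.drop k) := by
  intro fuel
  induction fuel with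
  | zero =>
    intro k hk
    rw [List.drop_eq_nil_of_le (by omega : lines.length ≤ k)]
    simp [PySem.List.enumerate, fbSeek]
  | succ n ih =>
    intro k hk
    have hklt : k < lines.length := by omega
    have hdrop : lines.drop k = lines[k] :: lines.drop (k + 1) :=
      List.drop_eq_getElem_cons hklt
    rw [hdrop, PySem.List.enumerate_cons, List.find?_cons, fbSeek]
    by_cases hp : PySem.Str.isIn (PySem.Str.lower start) (PySem.Str.lower lines[k]) = true
    · simp only [hp, if_pos]
      have hcast : ((k : Int) + 1) = ((k + 1 : Nat) : Int) := by push_cast; ring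
      simp only [hcast]
      rw [tail_eq lines
            (fun l => PySem.Str.isIn (PySem.Str.lower end_) (PySem.Str.lower l)) n (k+1) (by omega)]
      rw [fbCollect_eq]
      simp
    · simp only [hp, Bool.false_eq_true, if_false]
      have hcast : ((k : Int) + 1) = ((k + 1 : Nat) : Int) := by push_cast; ring
      rw [hcast]
      exact ih (k + 1) (by omega)

-- ===== VERDICT (by name: the statement is the Claim_ definition above) =====
theorem find_between_spec : Claim_equal_find_between := by
  intro lines start end_ _
  unfold Spec_find_between find_between find_between_alt
  have := seek_eq lines start end_ lines.length 0 (by omega)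
  simpa using this
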